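-- pv_equiv track=rewrite | github.com/DevGoyalG/InterviewBit-Solutions | Arrays/Even Product!.py | solve
-- ===== SOURCE A (Python) =====
-- def solve(A):
--     MOD=10**9 + 7
--     old_count=0
--
--     for n in A:
--         if n%2==1:
--             old_count+=1
--
--     result=pow(2, old_count, MOD) - 1
--     return result%MOD
-- ===== SOURCE B (Python) =====
-- def solve(A):
--     MOD = 10**9 + 7
--
--     def power_of_odds(lo, hi):
--         # product over A[lo:hi] of (2 if element is odd else 1), mod MOD,
--         # computed by divide and conquer
--         if hi - lo == 0:
--             return 1
--         if hi - lo == 1: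
--             return 2 if A[lo] % 2 == 1 else 1
--         mid = (lo + hi) // 2
--         return power_of_odds(lo, mid) * power_of_odds(mid, hi) % MOD
--
--     return (power_of_odds(0, len(A)) - 1) % MOD
-- ===== Notes on version B (the rewrite author's own statement) =====
-- stated objective: alternative
-- what changed: Replaces the linear count-the-odds pass followed by a modular exponentiation pow(2, count, MOD) by a divide-and-conquer recursion that splits the array in half and multiplies the two halves' products of per-element factors (2 for odd, 1 for even) mod MOD, never forming an odd count or calling pow.
import Mathlib
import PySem

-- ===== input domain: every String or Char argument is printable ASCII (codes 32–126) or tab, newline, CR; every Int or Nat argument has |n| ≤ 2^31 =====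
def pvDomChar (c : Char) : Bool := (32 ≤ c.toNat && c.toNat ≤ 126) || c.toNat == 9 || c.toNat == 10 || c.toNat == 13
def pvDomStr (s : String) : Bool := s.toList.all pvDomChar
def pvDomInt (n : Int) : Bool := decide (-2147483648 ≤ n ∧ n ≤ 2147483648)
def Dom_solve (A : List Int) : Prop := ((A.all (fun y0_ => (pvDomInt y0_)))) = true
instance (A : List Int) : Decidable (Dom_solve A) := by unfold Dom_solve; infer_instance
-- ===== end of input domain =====

-- B replaces 'count the odds, then pow(2, count, MOD)' by a divide-and-conquer recursion
-- multiplying per-element factors (2 if odd, 1 if even) mod MOD (alternative decomposition).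

-- ===== PORT A =====
-- count odds, then pow(2, count, MOD) - 1, then % MOD
def solve (A : List Int) : Int :=
  let MOD : Int := 1000000007
  let old_count : Int :=
    A.foldl (fun c n => if PySem.Int.mod n 2 == 1 then c + 1 else c) 0
  let result : Int := PySem.Int.powMod 2 old_count.toNat MOD - 1
  PySem.Int.mod result MOD

-- ===== PORT B =====
-- divide and conquer: product over A[lo:hi] of (2 if odd else 1) mod MOD
def pvPowOdds (A : List Int) (lo hi : Nat) : Int :=
  if hi - lo = 0 then 1
  else if hi - lo = 1 then
    if PySem.Int.mod ((PySem.List.pyGet? A (lo : Int)).getD 0) 2 == 1 then 2 else 1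
  else
    let mid := (lo + hi) / 2
    PySem.Int.mod (pvPowOdds A lo mid * pvPowOdds A mid hi) 1000000007
termination_by hi - lo
decreasing_by all_goals omega

def solve_alt (A : List Int) : Int :=
  PySem.Int.mod (pvPowOdds A 0 A.length - 1) 1000000007

-- ===== PRECONDITION & SPEC =====
def Spec_solve (A : List Int) (out : Int) : Prop := out = solve_alt A
instance (A : List Int) (out : Int) : Decidable (Spec_solve A out) := by unfold Spec_solve; infer_instance

-- ===== CLAIM =====
def Claim_equal_solve : Prop := ∀ (A : List Int), Dom_solve A → Spec_solve A (solve A)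

-- ===== LEMMAS AND PROOFS =====

/-- number of odd (in Python's sense, n % 2 == 1) elements of A[lo:hi] -/
def pvOddsIn (A : List Int) (lo hi : Nat) : Nat :=
  (((A.drop lo).take (hi - lo)).filter (fun n => PySem.Int.mod n 2 == 1)).length

theorem pvCount_foldl (A : List Int) : ∀ (c : Int),
    A.foldl (fun c n => if PySem.Int.mod n 2 == 1 then c + 1 else c) c
      = c + (pvOddsIn A 0 A.length : Int) := by
  induction A with
  | nil => intro c; simp [pvOddsIn]
  | cons x xs ih =>
    intro c
    rw [List.foldl_cons]
    have hdrop : pvOddsIn (x :: xs) 0 (x :: xs).length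
        = ((x :: xs).filter (fun n => PySem.Int.mod n 2 == 1)).length := by
      simp [pvOddsIn]
    by_cases h : (PySem.Int.mod x 2 == 1) = true
    · rw [if_pos h, ih]
      rw [hdrop, List.filter_cons, if_pos h]
      simp [pvOddsIn]
      ring
    · rw [if_neg h, ih]
      rw [hdrop, List.filter_cons, if_neg h]
      simp [pvOddsIn]

theorem pvOddsIn_split (A : List Int) (lo mid hi : Nat)
    (h1 : lo ≤ mid) (h2 : mid ≤ hi) :
    pvOddsIn A lo hi = pvOddsIn A lo mid + pvOddsIn A mid hi := by
  unfold pvOddsIn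
  have hsum : hi - lo = (mid - lo) + (hi - mid) := by omega
  rw [hsum, List.take_add, List.filter_append, List.length_append,
      List.drop_drop]
  have h3 : lo + (mid - lo) = mid := by omega
  rw [h3]

theorem pvPowOdds_eq (A : List Int) :
    ∀ (n lo hi : Nat), hi - lo ≤ n → hi ≤ A.length →
      pvPowOdds A lo hi = (2 ^ pvOddsIn A lo hi) % 1000000007 := by
  intro n
  induction n with
  | zero =>
    intro lo hi hn _
    have h0 : hi - lo = 0 := by omega
    rw [pvPowOdds, if_pos h0]
    simp [pvOddsIn, h0]
  | succ m ih =>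
    intro lo hi hn hlen
    rw [pvPowOdds]
    by_cases h0 : hi - lo = 0
    · rw [if_pos h0]; simp [pvOddsIn, h0]
    · rw [if_neg h0]
      by_cases h1 : hi - lo = 1
      · rw [if_pos h1]
        have hlo : lo < A.length := by omega
        have hget : PySem.List.pyGet? A (lo : Int) = some A[lo] := by
          simp [PySem.List.pyGet?, PySem.List.pyIdx?, hlo]
        have hdrop : A.drop lo = A[lo] :: A.drop (lo + 1) :=
          List.drop_eq_getElem_cons hlo
        have hodds : pvOddsIn A lo hi
            = ([A[lo]].filter (fun n => PySem.Int.mod n 2 == 1)).length := by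
          unfold pvOddsIn
          rw [h1, hdrop, List.take_succ_cons, List.take_zero]
        rw [hget]
        simp only [Option.getD_some]
        by_cases hodd : (PySem.Int.mod A[lo] 2 == 1) = true
        · rw [if_pos hodd]
          rw [hodds, List.filter_cons, if_pos hodd]
          norm_num
        · rw [if_neg hodd]
          rw [hodds, List.filter_cons, if_neg hodd]
          norm_num
      · rw [if_neg h1]
        show PySem.Int.mod (pvPowOdds A lo ((lo + hi) / 2) * pvPowOdds A ((lo + hi) / 2) hi) 1000000007
          = (2 ^ pvOddsIn A lo hi) % 1000000007
        have hlomid : lo ≤ (lo + hi) / 2 := by omega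
        have hmidhi : (lo + hi) / 2 ≤ hi := by omega
        rw [ih lo ((lo + hi) / 2) (by omega) (by omega),
            ih ((lo + hi) / 2) hi (by omega) hlen,
            pvOddsIn_split A lo ((lo + hi) / 2) hi hlomid hmidhi]
        rw [PySem.Int.mod_eq_emod_of_pos (by norm_num : (0:Int) < 1000000007)]
        rw [← Int.mul_emod, ← pow_add]

-- ===== VERDICT =====
theorem solve_spec : Claim_equal_solve := by
  intro A _
  unfold Spec_solve solve solve_alt
  simp only [pvCount_foldl A 0, zero_add, Int.toNat_natCast]
  rw [pvPowOdds_eq A A.length 0 A.length (by omega) (by omega)]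
  rw [PySem.Int.powMod_eq]
  simp only [PySem.Int.mod_eq_emod_of_pos (by norm_num : (0:Int) < 1000000007)]
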